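-- pv_equiv track=rewrite | github.com/kyclark/tiny_python_projects | word_search/word_search.py | all_strings
-- ===== SOURCE A (Python) =====
-- def all_strings(puzzle):
--     """Find all strings in puzzle"""
--
--     num_rows = len(puzzle)
--     num_cols = len(puzzle[0])
--     strings = []
--
--     # Horizontal
--     for row in puzzle:
--         strings.append(''.join(row))
--
--     # Vertical
--     for col_num in range(num_cols):
--         col = [puzzle[row_num][col_num] for row_num in range(num_rows)]
--         strings.append(''.join(col))
--
--     # Diagonals
--     for row_i in range(1, num_rows):
--         diag = []
--         col_num = 0
--         for row_j in range(row_i, -1, -1):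
--             diag.append(puzzle[row_j][col_num])
--             col_num += 1
--
--         if diag:
--             strings.append(''.join(diag))
--
--     for col_i in range(1, num_cols - 1):
--         diag = []
--
--         col_num = col_i
--         for row_num in range(num_rows - 1, -1, -1):
--             diag.append(puzzle[row_num][col_num])
--             col_num += 1
--             if col_num == num_cols:
--                 break
--
--         if diag:
--             strings.append(''.join(diag))
--
--     strings.extend([''.join(reversed(s)) for s in strings])
--     return strings
-- ===== SOURCE B (Python) =====
-- def all_strings(puzzle):
--     """Find all strings in puzzle"""
--     num_rows = len(puzzle)
--     num_cols = len(puzzle[0])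
--
--     # One bottom-to-top pass over all cells buckets every column (key c) and
--     # every anti-diagonal (key r + c, read bottom-to-top) at once.
--     cols = {}
--     diags = {}
--     for r in range(num_rows - 1, -1, -1):
--         for c, cell in enumerate(puzzle[r]):
--             cols.setdefault(c, []).append(cell)
--             diags.setdefault(r + c, []).append(cell)
--
--     strings = [''.join(row) for row in puzzle]
--     strings += [''.join(reversed(cols[c])) for c in range(num_cols)]
--     strings += [''.join(diags[s]) for s in range(1, num_rows + num_cols - 2)]
--     return strings + [s[::-1] for s in strings]
-- ===== Notes on version B (the rewrite author's own statement) =====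
-- stated objective: alternative
-- what changed: Replaces A's four separate index-driven scans (columns rebuilt by double indexing, two diagonal loops with a manual counter and a break) by one bottom-up pass over the cells that buckets each cell into a columns dict (key c) and an anti-diagonal dict (key r+c), then emits the buckets for s in range(1, num_rows+num_cols-2).
import Mathlib
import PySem

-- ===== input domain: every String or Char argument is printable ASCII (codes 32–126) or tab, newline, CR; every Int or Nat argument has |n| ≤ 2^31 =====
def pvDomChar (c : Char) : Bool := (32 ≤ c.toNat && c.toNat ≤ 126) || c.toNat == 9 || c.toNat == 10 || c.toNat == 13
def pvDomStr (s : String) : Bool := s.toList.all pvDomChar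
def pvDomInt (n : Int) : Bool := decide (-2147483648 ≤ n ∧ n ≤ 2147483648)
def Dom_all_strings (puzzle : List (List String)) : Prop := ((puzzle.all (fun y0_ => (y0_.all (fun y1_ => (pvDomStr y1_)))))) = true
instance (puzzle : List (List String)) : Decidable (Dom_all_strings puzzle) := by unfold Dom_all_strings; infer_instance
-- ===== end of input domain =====

-- B replaces A's four index-driven scans by one bottom-up pass bucketing every cell
-- into a columns dict (key c) and an anti-diagonal dict (key r+c); same cost, different structure.

-- ===== PORT A =====
-- puzzle[r][c] (both ports index cells this way; out-of-range excluded by Pre_)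
def pvCell (puzzle : List (List String)) (r c : Int) : String :=
  PySem.List.pyGetD (PySem.List.pyGetD puzzle r []) c ""

-- ''.join(l) for a list of strings
def pvJoin (l : List String) : String := PySem.Str.join "" l

-- ''.join(reversed(s))  /  s[::-1]  (both are the reversed string)
def pvRev (s : String) : String := String.ofList s.toList.reverse

-- the second diagonal loop of A, with its 'break' when col_num == num_cols
def pvDiag2Go (puzzle : List (List String)) (num_cols : Int) :
    List Int → List String → Int → List String
  | [], diag, _ => diag
  | r :: rest, diag, col =>
    let diag' := diag ++ [pvCell puzzle r col]
    if col + 1 = num_cols then diag' else pvDiag2Go puzzle num_cols rest diag' (col + 1)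

def all_strings (puzzle : List (List String)) : List String :=
  let num_rows : Int := (puzzle.length : Int)
  let num_cols : Int := ((PySem.List.pyGetD puzzle 0 []).length : Int)
  -- Horizontal
  let strings := puzzle.foldl (fun acc row => acc ++ [pvJoin row]) []
  -- Vertical
  let strings := (PySem.List.pyRange 0 num_cols 1).foldl (fun acc c =>
    acc ++ [pvJoin ((PySem.List.pyRange 0 num_rows 1).map (fun r => pvCell puzzle r c))]) strings
  -- Diagonals (upper-left triangle)
  let strings := (PySem.List.pyRange 1 num_rows 1).foldl (fun acc ri =>
    let p := (PySem.List.pyRange ri (-1) (-1)).foldl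
      (fun (s : List String × Int) rj => (s.1 ++ [pvCell puzzle rj s.2], s.2 + 1)) ([], 0)
    if p.1 ≠ [] then acc ++ [pvJoin p.1] else acc) strings
  -- Diagonals (lower-right, with break)
  let strings := (PySem.List.pyRange 1 (num_cols - 1) 1).foldl (fun acc ci =>
    let diag := pvDiag2Go puzzle num_cols (PySem.List.pyRange (num_rows - 1) (-1) (-1)) [] ci
    if diag ≠ [] then acc ++ [pvJoin diag] else acc) strings
  strings ++ strings.map pvRev

-- ===== PORT B =====
def all_strings_alt (puzzle : List (List String)) : List String :=
  let num_rows : Int := (puzzle.length : Int)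
  let num_cols : Int := ((PySem.List.pyGetD puzzle 0 []).length : Int)
  -- one bottom-up pass: cols.setdefault(c, []).append(cell); diags.setdefault(r+c, []).append(cell)
  let st := (PySem.List.pyRange (num_rows - 1) (-1) (-1)).foldl
    (fun (s : PySem.Dict Int (List String) × PySem.Dict Int (List String)) r =>
      (PySem.List.enumerate (PySem.List.pyGetD puzzle r [])).foldl
        (fun s2 p =>
          (PySem.Dict.modify s2.1 p.1 [] (· ++ [p.2]),
           PySem.Dict.modify s2.2 (r + p.1) [] (· ++ [p.2])))
        s)
    (PySem.Dict.empty, PySem.Dict.empty)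
  let strings := puzzle.map pvJoin
  let strings := strings ++ (PySem.List.pyRange 0 num_cols 1).map
    (fun c => pvJoin (PySem.Dict.getD st.1 c []).reverse)
  let strings := strings ++ (PySem.List.pyRange 1 (num_rows + num_cols - 2) 1).map
    (fun s => pvJoin (PySem.Dict.getD st.2 s []))
  strings ++ strings.map pvRev

-- ===== PRECONDITION & SPEC =====
-- Pre_ restricts to the natural word-search domain: a nonempty rectangular grid whose row
-- count does not exceed its column count (unless it has a single row).  Outside it A raises
-- IndexError (empty grid; more rows than columns), except on some ragged grids, where A's
-- value mixes ad-hoc reads of cells beyond column num_cols-1 — see the claim's cites.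
def Pre_all_strings (puzzle : List (List String)) : Prop :=
  puzzle ≠ [] ∧ (∀ row ∈ puzzle, row.length = (puzzle.headI).length) ∧
    (puzzle.length ≤ (puzzle.headI).length ∨ puzzle.length = 1)
instance (puzzle : List (List String)) : Decidable (Pre_all_strings puzzle) := by
  unfold Pre_all_strings; infer_instance

def pvWitness_all_strings : List (List String) :=
  [["c", "a", "t"], ["x", "o", "y"], ["d", "o", "g"]]

def Spec_all_strings (puzzle : List (List String)) (out : List String) : Prop :=
  out = all_strings_alt puzzle
instance (puzzle : List (List String)) (out : List String) : Decidable (Spec_all_strings puzzle out) := by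
  unfold Spec_all_strings; infer_instance

-- ===== CLAIM (what is proved, stated in full; the proofs are below) =====
def Claim_equal_all_strings : Prop := ∀ (puzzle : List (List String)),
  Dom_all_strings puzzle → Pre_all_strings puzzle → Spec_all_strings puzzle (all_strings puzzle)


-- ===== LEMMAS AND PROOFS =====

-- the walk of A's first diagonal loop: cells (r, c), r taken from the list, c counting up
def pvWI (puz : List (List String)) : List Int → Int → List String
  | [], _ => []
  | r :: rest, c => pvCell puz r c :: pvWI puz rest (c + 1)

theorem pv_fold_wi (puz : List (List String)) (L : List Int) :
    ∀ (acc : List String) (c0 : Int),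
      L.foldl (fun (s : List String × Int) rj => (s.1 ++ [pvCell puz rj s.2], s.2 + 1)) (acc, c0)
        = (acc ++ pvWI puz L c0, c0 + L.length) := by
  induction L with
  | nil => intro acc c0; simp [pvWI]
  | cons r rest ih =>
    intro acc c0
    simp only [List.foldl_cons, ih, pvWI, List.length_cons]
    refine Prod.ext ?_ ?_ <;> simp
    omega

theorem pv_wi_eq_map (puz : List (List String)) :
    ∀ (k : Nat) (a c0 : Int), a < k →
      pvWI puz (PySem.List.pyRange a (-1) (-1)) c0
        = (PySem.List.pyRange a (-1) (-1)).map (fun r => pvCell puz r (c0 + a - r)) := by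
  intro k
  induction k with
  | zero => intro a c0 h; rw [PySem.List.pyRange_neg_one_eq_nil (by omega)]; rfl
  | succ k ih =>
    intro a c0 h
    by_cases ha : a ≤ -1
    · rw [PySem.List.pyRange_neg_one_eq_nil ha]; rfl
    · rw [PySem.List.pyRange_neg_one_cons (by omega : (-1:Int) < a)]
      simp only [pvWI, List.map_cons]
      rw [show c0 + a - a = c0 from by omega, ih (a - 1) (c0 + 1) (by omega)]
      congr 1
      apply List.map_congr_left
      intro r _; congr 1; omega

theorem pv_d2_eq_map (puz : List (List String)) (mI : Int) :
    ∀ (k : Nat) (a c0 : Int) (diag : List String), a < k → c0 < mI →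
      pvDiag2Go puz mI (PySem.List.pyRange a (-1) (-1)) diag c0
        = diag ++ (PySem.List.pyRange a (max (-1) (a - (mI - c0))) (-1)).map
            (fun r => pvCell puz r (c0 + a - r)) := by
  intro k
  induction k with
  | zero =>
    intro a c0 diag h _
    rw [PySem.List.pyRange_neg_one_eq_nil (by omega : a ≤ -1),
        PySem.List.pyRange_neg_one_eq_nil (by omega : a ≤ max (-1) (a - (mI - c0)))]
    simp [pvDiag2Go]
  | succ k ih =>
    intro a c0 diag h hc
    by_cases ha : a ≤ -1
    · rw [PySem.List.pyRange_neg_one_eq_nil ha,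
          PySem.List.pyRange_neg_one_eq_nil (by omega : a ≤ max (-1) (a - (mI - c0)))]
      simp [pvDiag2Go]
    · rw [PySem.List.pyRange_neg_one_cons (by omega : (-1:Int) < a),
          PySem.List.pyRange_neg_one_cons (by omega : max (-1) (a - (mI - c0)) < a)]
      simp only [pvDiag2Go, List.map_cons]
      by_cases hm : c0 + 1 = mI
      · rw [if_pos hm, PySem.List.pyRange_neg_one_eq_nil (by omega : a - 1 ≤ max (-1) (a - (mI - c0)))]
        simp only [List.map_nil]
        have : c0 + a - a = c0 := by omega
        rw [this]
      · rw [if_neg hm, ih (a - 1) (c0 + 1) (diag ++ [pvCell puz a c0]) (by omega) (by omega)]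
        have h1 : max (-1) (a - 1 - (mI - (c0 + 1))) = max (-1) (a - (mI - c0)) := by omega
        rw [h1, List.append_assoc]
        congr 1
        simp only [List.cons_append, List.nil_append]
        congr 1
        · congr 1; omega
        · apply List.map_congr_left; intro r _; congr 1; omega

theorem pv_filter_enumerate (xs : List String) :
    ∀ (s t : Int),
      (PySem.List.enumerate xs s).filter (fun p => p.1 == t)
        = if s ≤ t ∧ t < s + xs.length then [(t, xs.getD (t - s).toNat "")] else [] := by
  induction xs with
  | nil =>
    intro s t
    rw [PySem.List.enumerate_nil, if_neg (by simp)]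
    rfl
  | cons x xs ih =>
    intro s t
    rw [PySem.List.enumerate_cons]
    by_cases hst : s = t
    · subst hst
      rw [List.filter_cons_of_pos (by simp), ih]
      rw [if_neg (by omega), if_pos (by simp)]
      simp
    · rw [List.filter_cons_of_neg (by simp; omega), ih]
      by_cases hin : s + 1 ≤ t ∧ t < s + 1 + xs.length
      · rw [if_pos hin, if_pos (by simp at hin ⊢; omega)]
        have h1 : (t - s).toNat = (t - (s + 1)).toNat + 1 := by omega
        rw [h1, List.getD_cons_succ]
      · rw [if_neg hin, if_neg (by simp at hin ⊢; omega)]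

theorem pv_flatMap_if {α β : Type} (l : List α) (p : α → Prop) [DecidablePred p] (f : α → β) :
    l.flatMap (fun r => if p r then [f r] else [])
      = (l.filter (fun r => decide (p r))).map f := by
  induction l with
  | nil => rfl
  | cons r rest ih =>
    by_cases h : p r
    · simp [List.flatMap_cons, ih, h]
    · simp [List.flatMap_cons, ih, h]

theorem pv_filter_pyRange_neg (lo hi : Int) :
    ∀ (k : Nat) (a : Int), a < k →
      (PySem.List.pyRange a (-1) (-1)).filter (fun r => decide (lo < r ∧ r ≤ hi))
        = PySem.List.pyRange (min a hi) (max (-1) lo) (-1) := by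
  intro k
  induction k with
  | zero =>
    intro a h
    rw [PySem.List.pyRange_neg_one_eq_nil (by omega : a ≤ -1),
        PySem.List.pyRange_neg_one_eq_nil (by omega : min a hi ≤ max (-1) lo)]
    rfl
  | succ k ih =>
    intro a h
    by_cases ha : a ≤ -1
    · rw [PySem.List.pyRange_neg_one_eq_nil ha,
          PySem.List.pyRange_neg_one_eq_nil (by omega : min a hi ≤ max (-1) lo)]
      rfl
    · rw [PySem.List.pyRange_neg_one_cons (by omega : (-1:Int) < a)]
      by_cases hin : lo < a ∧ a ≤ hi
      · rw [List.filter_cons_of_pos (by simpa using hin), ih (a - 1) (by omega)]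
        rw [PySem.List.pyRange_neg_one_cons (by omega : max (-1) lo < min a hi)]
        have h1 : min a hi = a := by omega
        have h2 : min (a - 1) hi = a - 1 := by omega
        rw [h1, h2]
      · rw [List.filter_cons_of_neg (by simpa using hin), ih (a - 1) (by omega)]
        by_cases hhi : hi < a
        · have : min (a - 1) hi = min a hi := by omega
          rw [this]
        · rw [PySem.List.pyRange_neg_one_eq_nil (by omega : min (a - 1) hi ≤ max (-1) lo),
              PySem.List.pyRange_neg_one_eq_nil (by omega : min a hi ≤ max (-1) lo)]

theorem pv_flatMap_singleton {α β : Type} (l : List α) (f : α → β) :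
    l.flatMap (fun r => [f r]) = l.map f := by
  induction l with
  | nil => rfl
  | cons r rest ih => simp [List.flatMap_cons, ih]

theorem pv_st_eq (puz : List (List String)) (rows : List Int) :
    ∀ (d1 d2 : PySem.Dict Int (List String)),
      rows.foldl (fun (s : PySem.Dict Int (List String) × PySem.Dict Int (List String)) r =>
          (PySem.List.enumerate (PySem.List.pyGetD puz r []) 0).foldl
            (fun s2 p =>
              (PySem.Dict.modify s2.1 p.1 [] (· ++ [p.2]),
               PySem.Dict.modify s2.2 (r + p.1) [] (· ++ [p.2]))) s) (d1, d2)
        = ((rows.flatMap (fun r => PySem.List.enumerate (PySem.List.pyGetD puz r []) 0)).foldl (fun d p => d.modify p.1 [] (· ++ [p.2])) d1,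
           (rows.flatMap (fun r => (PySem.List.enumerate (PySem.List.pyGetD puz r []) 0).map
              (fun p => (r + p.1, p.2)))).foldl (fun d p => d.modify p.1 [] (· ++ [p.2])) d2) := by
  induction rows with
  | nil => intro d1 d2; rfl
  | cons r rest ih =>
    intro d1 d2
    rw [List.foldl_cons,
        PySem.List.foldl_prod_mk (f := fun d (p : Int × String) => PySem.Dict.modify d p.1 [] (· ++ [p.2]))
          (g := fun d (p : Int × String) => PySem.Dict.modify d (r + p.1) [] (· ++ [p.2])),
        ih]
    rw [List.flatMap_cons, List.flatMap_cons, List.foldl_append, List.foldl_append]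
    congr 2
    rw [List.foldl_map]

theorem pv_bucketC (puz : List (List String)) (m : Nat) (rows : List Int)
    (hrect : ∀ r ∈ rows, (PySem.List.pyGetD puz r []).length = m)
    (c : Int) (hc0 : 0 ≤ c) (hcm : c < m) :
    ((rows.flatMap (fun r => PySem.List.enumerate (PySem.List.pyGetD puz r []) 0)).foldl
        (fun d p => d.modify p.1 [] (· ++ [p.2])) PySem.Dict.empty).getD c []
      = rows.map (fun r => pvCell puz r c) := by
  rw [PySem.Dict.getD_foldl_modify_append, PySem.Dict.getD_empty, List.nil_append,
      List.filter_flatMap, List.map_flatMap]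
  have hrow : ∀ r ∈ rows,
      (List.map (fun (x : Int × String) => x.2)
        (List.filter (fun p => p.1 == c) (PySem.List.enumerate (PySem.List.pyGetD puz r []) 0)))
        = [pvCell puz r c] := by
    intro r hr
    rw [pv_filter_enumerate, if_pos (by rw [hrect r hr]; omega)]
    simp only [List.map_cons, List.map_nil]
    congr 1
    rw [pvCell, PySem.List.pyGetD_of_nonneg _ _ hc0]
    congr 1
    omega
  rw [List.flatMap_congr hrow]
  exact pv_flatMap_singleton rows _

theorem pv_bucketD (puz : List (List String)) (m : Nat) (rows : List Int)
    (hrect : ∀ r ∈ rows, (PySem.List.pyGetD puz r []).length = m) (s : Int) :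
    ((rows.flatMap (fun r => (PySem.List.enumerate (PySem.List.pyGetD puz r []) 0).map
        (fun p => (r + p.1, p.2)))).foldl (fun d p => d.modify p.1 [] (· ++ [p.2])) PySem.Dict.empty).getD s []
      = (rows.filter (fun r => decide (s - m < r ∧ r ≤ s))).map (fun r => pvCell puz r (s - r)) := by
  rw [PySem.Dict.getD_foldl_modify_append, PySem.Dict.getD_empty, List.nil_append,
      List.filter_flatMap, List.map_flatMap]
  have hrow : ∀ r ∈ rows,
      (List.map (fun (x : Int × String) => x.2)
        (List.filter (fun p => p.1 == s)
          (List.map (fun (p : Int × String) => (r + p.1, p.2))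
            (PySem.List.enumerate (PySem.List.pyGetD puz r []) 0))))
        = if s - m < r ∧ r ≤ s then [pvCell puz r (s - r)] else [] := by
    intro r hr
    rw [List.filter_map]
    have hcong : List.filter ((fun (p : Int × String) => p.1 == s) ∘ fun p => (r + p.1, p.2))
          (PySem.List.enumerate (PySem.List.pyGetD puz r []) 0)
        = List.filter (fun p => p.1 == s - r) (PySem.List.enumerate (PySem.List.pyGetD puz r []) 0) := by
      apply List.filter_congr
      intro x _
      rw [Bool.eq_iff_iff]
      simp only [Function.comp_apply, beq_iff_eq]
      omega
    rw [hcong, pv_filter_enumerate]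
    by_cases hcond : s - m < r ∧ r ≤ s
    · rw [if_pos (by rw [hrect r hr]; omega), if_pos hcond]
      simp only [List.map_cons, List.map_nil]
      congr 1
      rw [pvCell, PySem.List.pyGetD_of_nonneg _ _ (by omega : (0:Int) ≤ s - r)]
      congr 1
      omega
    · rw [if_neg (by rw [hrect r hr]; omega), if_neg hcond]
      rfl
  rw [List.flatMap_congr hrow]
  exact pv_flatMap_if rows (fun r => s - m < r ∧ r ≤ s) (fun r => pvCell puz r (s - r))

set_option maxHeartbeats 2000000 in
theorem pv_main (puzzle : List (List String)) (h : Pre_all_strings puzzle) :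
    all_strings puzzle = all_strings_alt puzzle := by
  obtain ⟨hne, hrect0, hnm⟩ := h
  have hm0 : PySem.List.pyGetD puzzle 0 [] = puzzle.headI := by
    rw [PySem.List.pyGetD_of_nonneg _ _ (by norm_num : (0:Int) ≤ 0)]
    cases puzzle with
    | nil => exact absurd rfl hne
    | cons a l => rfl
  simp only [all_strings, all_strings_alt]
  set n : Nat := puzzle.length with hn
  set m : Nat := (PySem.List.pyGetD puzzle 0 []).length with hm
  have hn1 : 1 ≤ n := List.length_pos_iff.mpr hne
  have hnm' : n ≤ m ∨ n = 1 := by rw [hm, hm0]; exact hnm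
  have hlen : ∀ r : Int, 0 ≤ r → r < (n : Int) → (PySem.List.pyGetD puzzle r []).length = m := by
    intro r h0 hr
    rw [PySem.List.pyGetD_of_nonneg _ _ h0]
    have hlt : r.toNat < puzzle.length := by omega
    rw [List.getD_eq_getElem _ _ hlt, hm, hm0]
    exact hrect0 _ (List.getElem_mem hlt)
  -- A side: horizontal and vertical folds are maps
  simp only [PySem.List.foldl_append_singleton_eq_map, List.nil_append]
  -- A side: first diagonal fold
  have hD1 : ∀ S : List String,
      List.foldl
        (fun acc ri =>
          if
              (List.foldl (fun s rj => (s.1 ++ [pvCell puzzle rj s.2], s.2 + 1)) ([], 0)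
                    (PySem.List.pyRange ri (-1) (-1))).1 ≠
                [] then
            acc ++
              [pvJoin
                  (List.foldl (fun s rj => (s.1 ++ [pvCell puzzle rj s.2], s.2 + 1)) ([], 0)
                      (PySem.List.pyRange ri (-1) (-1))).1]
          else acc)
        S (PySem.List.pyRange 1 (n : Int))
      = S ++ (PySem.List.pyRange 1 (n : Int)).map
          (fun ri => pvJoin ((PySem.List.pyRange ri (-1) (-1)).map
            (fun r => pvCell puzzle r (0 + ri - r)))) := by
    intro S
    rw [PySem.List.foldl_congr_mem _ _
        (fun acc ri => acc ++ [pvJoin ((PySem.List.pyRange ri (-1) (-1)).map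
          (fun r => pvCell puzzle r (0 + ri - r)))]) _ ?_,
      PySem.List.foldl_append_singleton_eq_map]
    intro acc ri hri
    obtain ⟨hri1, hri2⟩ := PySem.List.mem_pyRange_one.mp hri
    rw [pv_fold_wi, pv_wi_eq_map puzzle n ri 0 (by omega)]
    simp only [List.nil_append]
    rw [if_pos ?_]
    rw [PySem.List.pyRange_neg_one_cons (by omega : (-1:Int) < ri)]
    simp
  rw [hD1]
  -- A side: second diagonal fold (with break)
  have hD2 : ∀ S : List String,
      List.foldl
        (fun acc ci =>
          if
              pvDiag2Go puzzle (m : Int)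
                  (PySem.List.pyRange ((n : Int) - 1) (-1) (-1)) [] ci ≠
                [] then
            acc ++
              [pvJoin
                  (pvDiag2Go puzzle (m : Int)
                    (PySem.List.pyRange ((n : Int) - 1) (-1) (-1)) [] ci)]
          else acc)
        S (PySem.List.pyRange 1 ((m : Int) - 1))
      = S ++ (PySem.List.pyRange 1 ((m : Int) - 1)).map
          (fun ci => pvJoin ((PySem.List.pyRange ((n : Int) - 1)
              (max (-1) ((n : Int) - 1 - ((m : Int) - ci))) (-1)).map
            (fun r => pvCell puzzle r (ci + ((n : Int) - 1) - r)))) := by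
    intro S
    rw [PySem.List.foldl_congr_mem _ _
        (fun acc ci => acc ++ [pvJoin ((PySem.List.pyRange ((n : Int) - 1)
              (max (-1) ((n : Int) - 1 - ((m : Int) - ci))) (-1)).map
            (fun r => pvCell puzzle r (ci + ((n : Int) - 1) - r)))]) _ ?_,
      PySem.List.foldl_append_singleton_eq_map]
    intro acc ci hci
    obtain ⟨hci1, hci2⟩ := PySem.List.mem_pyRange_one.mp hci
    rw [pv_d2_eq_map puzzle (m : Int) n ((n : Int) - 1) ci [] (by omega) (by omega)]
    simp only [List.nil_append]
    rw [if_pos ?_]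
    rw [PySem.List.pyRange_neg_one_cons (by omega : max (-1) ((n : Int) - 1 - ((m : Int) - ci)) < (n : Int) - 1)]
    simp
  rw [hD2]
  -- B side: the bucket dicts
  rw [pv_st_eq puzzle (PySem.List.pyRange ((n : Int) - 1) (-1) (-1)) PySem.Dict.empty PySem.Dict.empty]
  have hrows : ∀ r ∈ PySem.List.pyRange ((n : Int) - 1) (-1) (-1),
      (PySem.List.pyGetD puzzle r []).length = m := by
    intro r hr
    obtain ⟨h1, h2⟩ := PySem.List.mem_pyRange_neg_one.mp hr
    exact hlen r (by omega) (by omega)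
  have hrev : PySem.List.pyRange ((n : Int) - 1) (-1) (-1) = (PySem.List.pyRange 0 (n : Int)).reverse := by
    rw [PySem.List.pyRange_neg_one_eq_reverse]
    norm_num
  have hVB : (PySem.List.pyRange 0 (m : Int)).map
      (fun c => pvJoin (((PySem.List.pyRange ((n : Int) - 1) (-1) (-1)).flatMap
          (fun r => PySem.List.enumerate (PySem.List.pyGetD puzzle r []) 0)).foldl
            (fun d p => d.modify p.1 [] (· ++ [p.2])) PySem.Dict.empty |>.getD c []).reverse)
      = (PySem.List.pyRange 0 (m : Int)).map
          (fun c => pvJoin ((PySem.List.pyRange 0 (n : Int)).map (fun r => pvCell puzzle r c))) := by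
    apply List.map_congr_left
    intro c hc
    obtain ⟨hc1, hc2⟩ := PySem.List.mem_pyRange_one.mp hc
    rw [pv_bucketC puzzle m _ hrows c hc1 hc2, hrev]
    simp [List.map_reverse]
  have hDB : ∀ s : Int,
      (((PySem.List.pyRange ((n : Int) - 1) (-1) (-1)).flatMap
          (fun r => (PySem.List.enumerate (PySem.List.pyGetD puzzle r []) 0).map
            (fun p => (r + p.1, p.2)))).foldl
            (fun d p => d.modify p.1 [] (· ++ [p.2])) PySem.Dict.empty).getD s []
      = (PySem.List.pyRange (min ((n : Int) - 1) s) (max (-1) (s - (m : Int))) (-1)).map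
          (fun r => pvCell puzzle r (s - r)) := by
    intro s
    rw [pv_bucketD puzzle m _ hrows s,
        pv_filter_pyRange_neg (s - (m : Int)) s n ((n : Int) - 1) (by omega)]
  -- the two diagonal segments are B's single diagonal range
  have hdiag : (PySem.List.pyRange 1 (n : Int)).map
        (fun ri => pvJoin ((PySem.List.pyRange ri (-1) (-1)).map
          (fun r => pvCell puzzle r (0 + ri - r))))
      ++ (PySem.List.pyRange 1 ((m : Int) - 1)).map
          (fun ci => pvJoin ((PySem.List.pyRange ((n : Int) - 1)
              (max (-1) ((n : Int) - 1 - ((m : Int) - ci))) (-1)).map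
            (fun r => pvCell puzzle r (ci + ((n : Int) - 1) - r))))
      = (PySem.List.pyRange 1 ((n : Int) + (m : Int) - 2)).map
          (fun s => pvJoin ((PySem.List.pyRange (min ((n : Int) - 1) s) (max (-1) (s - (m : Int))) (-1)).map
            (fun r => pvCell puzzle r (s - r)))) := by
    by_cases hm2 : m ≤ 1
    · have hn1' : n = 1 := by omega
      rw [PySem.List.pyRange_one_eq_nil (by omega : (n : Int) ≤ 1),
          PySem.List.pyRange_one_eq_nil (by omega : (m : Int) - 1 ≤ 1),
          PySem.List.pyRange_one_eq_nil (by omega : (n : Int) + (m : Int) - 2 ≤ 1)]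
      rfl
    · rw [PySem.List.pyRange_one_append 1 (n : Int) ((n : Int) + (m : Int) - 2) (by omega) (by omega),
          List.map_append]
      congr 1
      · apply List.map_congr_left
        intro s hs
        obtain ⟨hs1, hs2⟩ := PySem.List.mem_pyRange_one.mp hs
        have hnm2 : (n : Int) ≤ (m : Int) := by omega
        rw [show min ((n : Int) - 1) s = s by omega, show max (-1) (s - (m : Int)) = -1 by omega]
        congr 1
        apply List.map_congr_left
        intro r _
        congr 1
        omega
      · rw [PySem.List.pyRange_one (n : Int) ((n : Int) + (m : Int) - 2),
            PySem.List.pyRange_one 1 ((m : Int) - 1),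
            show ((n : Int) + (m : Int) - 2 - (n : Int)) = ((m : Int) - 1 - 1) by omega,
            List.map_map, List.map_map]
        apply List.map_congr_left
        intro k _
        simp only [Function.comp_apply]
        rw [show min ((n : Int) - 1) ((n : Int) + (k : Int)) = (n : Int) - 1 by omega,
            show max (-1) ((n : Int) + (k : Int) - (m : Int)) = max (-1) ((n : Int) - 1 - ((m : Int) - (1 + (k : Int)))) by omega]
        congr 1
        apply List.map_congr_left
        intro r _
        congr 1
        omega
  rw [hVB]
  dsimp only
  simp only [hDB]
  set D1 : List String := (PySem.List.pyRange 1 (n : Int)).map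
      (fun ri => pvJoin ((PySem.List.pyRange ri (-1) (-1)).map
        (fun r => pvCell puzzle r (0 + ri - r)))) with hsD1
  set D2 : List String := (PySem.List.pyRange 1 ((m : Int) - 1)).map
      (fun ci => pvJoin ((PySem.List.pyRange ((n : Int) - 1)
          (max (-1) ((n : Int) - 1 - ((m : Int) - ci))) (-1)).map
        (fun r => pvCell puzzle r (ci + ((n : Int) - 1) - r)))) with hsD2
  set DB : List String := (PySem.List.pyRange 1 ((n : Int) + (m : Int) - 2)).map
      (fun s => pvJoin ((PySem.List.pyRange (min ((n : Int) - 1) s) (max (-1) (s - (m : Int))) (-1)).map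
        (fun r => pvCell puzzle r (s - r)))) with hsDB
  have h1 : ∀ T : List String, D1 ++ (D2 ++ T) = DB ++ T := by
    intro T; rw [← List.append_assoc, hdiag]
  have h2 : D1.map pvRev ++ D2.map pvRev = DB.map pvRev := by
    rw [← List.map_append, hdiag]
  simp only [List.map_append, List.append_assoc, h1, h2]

-- ===== VERDICT (by name: the statement is the Claim_ definition above) =====
theorem all_strings_spec : Claim_equal_all_strings := by
  intro puzzle _ hpre
  unfold Spec_all_strings
  exact pv_main puzzle hpre
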